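-- pv_equiv track=rewrite | github.com/yskang/AlgorithmPractice | baekjoon/python/ppap_16120.py | solution
-- ===== SOURCE A (Python) =====
-- def solution(s: list):
--     stack = []
--     for c in s:
--         stack.append(c)
--         if stack[len(stack)-4 if len(stack)-4 >= 0 else 0:len(stack)] == ['P', 'P', 'A', 'P']:
--             stack.pop()
--             stack.pop()
--             stack.pop()
--
--     stack = ''.join(stack)
--     if stack.count('A') == 0:
--         return 'PPAP'
--     return 'NP'
-- ===== SOURCE B (Python) =====
-- def solution(s: list):
--     # Right-to-left pass: build the reversed normal form, applying PPAP -> P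
--     # at the front (i.e. at the end of the reversed accumulator).
--     rev = []
--     for c in reversed(s):
--         if c == 'P' and rev[-3:] == ['P', 'A', 'P']:
--             del rev[-3:]        # 'P' + 'P','A','P' collapses to this 'P'
--         rev.append(c)
--     t = ''.join(reversed(rev))
--     return 'PPAP' if t.count('A') == 0 else 'NP'
-- ===== Notes on version B (the rewrite author's own statement) =====
-- stated objective: alternative
-- what changed: B traverses the list right-to-left, building the reversed normal form and applying the PPAP->P rule at the front (test-before-push, delete a 3-slice) instead of A's left-to-right suffix-stack with slice-compare and three pops; equality rests on proving that the two reduction orders reach the same normal form.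
import Mathlib
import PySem

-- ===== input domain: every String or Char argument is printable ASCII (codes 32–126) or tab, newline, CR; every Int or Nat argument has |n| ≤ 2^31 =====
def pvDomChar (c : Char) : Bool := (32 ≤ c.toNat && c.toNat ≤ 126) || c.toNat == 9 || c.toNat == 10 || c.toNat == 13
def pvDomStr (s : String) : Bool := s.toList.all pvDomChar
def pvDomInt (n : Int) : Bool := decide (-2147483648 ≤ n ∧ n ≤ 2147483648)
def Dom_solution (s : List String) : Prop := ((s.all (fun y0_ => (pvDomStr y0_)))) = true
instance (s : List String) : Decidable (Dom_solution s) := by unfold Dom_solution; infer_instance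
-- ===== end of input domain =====

-- B replaces A's left-to-right suffix-stack pass by a right-to-left pass that applies
-- the PPAP->P rule at the front of the remaining normal form (objective: alternative,
-- same cost; the proof shows the two reduction orders reach the same normal form).

-- ===== PORT A =====
-- one iteration of A's loop body: append, then compare the 4-element suffix slice, pop thrice
def stepA (stack : List String) (c : String) : List String :=
  let st := stack ++ [c]
  if PySem.List.slice st
       (some (if (st.length : Int) - 4 ≥ 0 then (st.length : Int) - 4 else 0))
       (some (st.length : Int)) = ["P", "P", "A", "P"]
  then st.dropLast.dropLast.dropLast
  else st

def solution (s : List String) : String :=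
  let stack := s.foldl stepA []
  let joined := PySem.Str.join "" stack       -- ''.join(stack)
  if PySem.Str.count joined "A" = 0 then "PPAP" else "NP"

-- ===== PORT B =====
-- one iteration of B's loop body (the loop runs over reversed(s)):
-- test-before-push on the reversed accumulator, delete the 3-slice (del rev[-3:]), push c
def stepB (rev : List String) (c : String) : List String :=
  let rev' := if c = "P" ∧ PySem.List.slice rev (some (-3)) none = ["P", "A", "P"]
              then PySem.List.slice rev none (some (-3))
              else rev
  rev' ++ [c]

def solution_alt (s : List String) : String :=
  let rev := s.reverse.foldl stepB []
  let t := PySem.Str.join "" rev.reverse      -- ''.join(reversed(rev))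
  if PySem.Str.count t "A" = 0 then "PPAP" else "NP"

-- ===== PRECONDITION & SPEC =====
def Spec_solution (s : List String) (out : String) : Prop := out = solution_alt s
instance (s : List String) (out : String) : Decidable (Spec_solution s out) := by unfold Spec_solution; infer_instance

-- ===== CLAIM (what is proved, stated in full; the proofs are below) =====
def Claim_equal_solution : Prop := ∀ (s : List String), Dom_solution s → Spec_solution s (solution s)

-- ===== LEMMAS AND PROOFS =====

-- gstep is the front-form of B's loop body on t = rev.reverse
def gstep (c : String) (t : List String) : List String :=
  if c = "P" ∧ t.take 3 = ["P", "A", "P"] then c :: t.drop 3 else c :: t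

theorem stepA_short (u : List String) (c : String) (h : u.length ≤ 2) :
    stepA u c = u ++ [c] := by
  simp only [stepA]
  have h4 : ¬(((u ++ [c]).length : Int) - 4 ≥ 0) := by
    simp [List.length_append]; omega
  rw [if_neg h4]
  rw [PySem.List.slice_zero_start, PySem.List.slice_to_natCast, List.take_length]
  have hne : u ++ [c] ≠ ["P","P","A","P"] := by
    intro he; apply_fun List.length at he; simp at he; omega
  rw [if_neg hne]

theorem stepA_concat3 (w : List String) (d e f c : String) :
    stepA (w ++ [d, e, f]) c =
      if d = "P" ∧ e = "P" ∧ f = "A" ∧ c = "P" then w ++ [d] else w ++ [d, e, f, c] := by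
  simp only [stepA]
  have hst : (w ++ [d, e, f]) ++ [c] = w ++ [d, e, f, c] := by simp
  rw [hst]
  have hlen : (w ++ [d, e, f, c]).length = w.length + 4 := by simp
  have h4 : (((w ++ [d, e, f, c]).length : Int) - 4 ≥ 0) := by
    rw [hlen]; push_cast; omega
  rw [if_pos h4]
  have hidx : (((w ++ [d, e, f, c]).length : Int) - 4) = ((w.length : Nat) : Int) := by
    rw [hlen]; push_cast; ring
  rw [hidx, hlen]
  have hcast : ((w.length + 4 : Nat) : Int) = (((w.length + 4 : Nat) : Nat) : Int) := rfl
  rw [hcast, PySem.List.slice_natCast, List.drop_left]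
  have ht : ([d, e, f, c].take (w.length + 4 - w.length)) = [d, e, f, c] := by
    have h5 : w.length + 4 - w.length = 4 := by omega
    rw [h5]
    rfl
  rw [ht]
  have hd : (w ++ [d, e, f, c]).dropLast.dropLast.dropLast = w ++ [d] := by
    have h1 : w ++ [d, e, f, c] = (w ++ [d, e, f]) ++ [c] := by simp
    have h2 : w ++ [d, e, f] = (w ++ [d, e]) ++ [f] := by simp
    have h3 : w ++ [d, e] = (w ++ [d]) ++ [e] := by simp
    rw [h1, List.dropLast_concat, h2, List.dropLast_concat, h3, List.dropLast_concat]
  rw [hd]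
  by_cases hc : [d, e, f, c] = ["P", "P", "A", "P"]
  · rw [if_pos hc]
    have hp : d = "P" ∧ e = "P" ∧ f = "A" ∧ c = "P" := by simpa using hc
    rw [if_pos hp]
  · rw [if_neg hc]
    have hp : ¬(d = "P" ∧ e = "P" ∧ f = "A" ∧ c = "P") := by
      intro ⟨h1, h2, h3, h4'⟩; exact hc (by simp [h1, h2, h3, h4'])
    rw [if_neg hp]

theorem stepA_three (d e f c : String) :
    stepA [d, e, f] c =
      if d = "P" ∧ e = "P" ∧ f = "A" ∧ c = "P" then [d] else [d, e, f, c] := by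
  simpa using stepA_concat3 [] d e f c

theorem stepA_four (x d e f c : String) :
    stepA [x, d, e, f] c =
      if d = "P" ∧ e = "P" ∧ f = "A" ∧ c = "P" then [x, d] else [x, d, e, f, c] := by
  simpa using stepA_concat3 [x] d e f c

theorem stepA_five (x y d e f c : String) :
    stepA [x, y, d, e, f] c =
      if d = "P" ∧ e = "P" ∧ f = "A" ∧ c = "P" then [x, y, d] else [x, y, d, e, f, c] := by
  simpa using stepA_concat3 [x, y] d e f c

theorem stepA_long (x y z : String) (m : List String) (d e f c : String) :
    stepA (x :: y :: z :: (m ++ [d, e, f])) c =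
      if d = "P" ∧ e = "P" ∧ f = "A" ∧ c = "P"
      then x :: y :: z :: (m ++ [d])
      else x :: y :: z :: (m ++ [d, e, f, c]) := by
  have h := stepA_concat3 (x :: y :: z :: m) d e f c
  simpa using h

theorem stepA_six (x y z d e f c : String) :
    stepA [x, y, z, d, e, f] c =
      if d = "P" ∧ e = "P" ∧ f = "A" ∧ c = "P" then [x, y, z, d] else [x, y, z, d, e, f, c] := by
  simpa using stepA_concat3 [x, y, z] d e f c

theorem gstep_long (a x y z : String) (l : List String) :
    gstep a (x :: y :: z :: l) =
      if a = "P" ∧ [x, y, z] = ["P", "A", "P"] then a :: l else a :: x :: y :: z :: l := by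
  simp [gstep]

theorem decomp (u : List String) :
    u.length ≤ 2 ∨ ∃ w d e f, u = w ++ [d, e, f] := by
  rcases hr : u.reverse with _ | ⟨f, _ | ⟨e, _ | ⟨d, wr⟩⟩⟩
  · left; have h2 : u.reverse.length ≤ 2 := by rw [hr]; simp
    simpa using h2
  · left; have h2 : u.reverse.length ≤ 2 := by rw [hr]; simp
    simpa using h2
  · left; have h2 : u.reverse.length ≤ 2 := by rw [hr]; simp
    simpa using h2
  · refine Or.inr ⟨wr.reverse, d, e, f, ?_⟩
    rw [← List.reverse_reverse u, hr]; simp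

theorem commute (u : List String) (a c : String) :
    gstep a (stepA u c) = stepA (gstep a u) c := by
  rcases decomp u with h | ⟨w, d, e, f, rfl⟩
  · rcases u with _ | ⟨x, _ | ⟨y, _ | ⟨z, t⟩⟩⟩
    · rw [stepA_short _ _ (by simp)]
      have h1 : gstep a [] = [a] := by simp [gstep]
      rw [h1, stepA_short _ _ (by simp)]
      simp [gstep]
    · rw [stepA_short _ _ (by simp)]
      have h1 : gstep a [x] = [a, x] := by simp [gstep]
      rw [h1, stepA_short _ _ (by simp)]
      simp [gstep]
    · rw [stepA_short _ _ (by simp)]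
      have h1 : gstep a [x, y] = [a, x, y] := by simp [gstep]
      rw [h1, stepA_three]
      simp only [List.cons_append, List.nil_append]
      simp only [gstep]
      split_ifs <;> simp_all
    · simp at h
  · rcases w with _ | ⟨x, _ | ⟨y, _ | ⟨z, m⟩⟩⟩
    · simp only [List.nil_append]
      rw [stepA_three]
      simp only [gstep]
      split_ifs <;> simp_all [stepA_short, stepA_four]
    · simp only [List.cons_append, List.nil_append]
      rw [stepA_four]
      simp only [gstep]
      split_ifs <;> simp_all [stepA_short, stepA_five]
    · simp only [List.cons_append, List.nil_append]
      rw [stepA_five]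
      simp only [gstep]
      split_ifs <;> simp_all [stepA_three, stepA_six]
    · have hu : (x :: y :: z :: m) ++ [d, e, f] = x :: y :: z :: (m ++ [d, e, f]) := by simp
      rw [hu, stepA_long]
      by_cases hB : d = "P" ∧ e = "P" ∧ f = "A" ∧ c = "P"
      · rw [if_pos hB]
        rw [gstep_long, gstep_long]
        by_cases hF : a = "P" ∧ ([x, y, z] : List String) = ["P", "A", "P"]
        · rw [if_pos hF, if_pos hF]
          have h2 : a :: (m ++ [d, e, f]) = (a :: m) ++ [d, e, f] := by simp
          rw [h2, stepA_concat3, if_pos hB]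
          simp
        · rw [if_neg hF, if_neg hF]
          have h2 : a :: x :: y :: z :: (m ++ [d, e, f]) = (a :: x :: y :: z :: m) ++ [d, e, f] := by simp
          rw [h2, stepA_concat3, if_pos hB]
          simp
      · rw [if_neg hB]
        rw [gstep_long, gstep_long]
        by_cases hF : a = "P" ∧ ([x, y, z] : List String) = ["P", "A", "P"]
        · rw [if_pos hF, if_pos hF]
          have h2 : a :: (m ++ [d, e, f]) = (a :: m) ++ [d, e, f] := by simp
          rw [h2, stepA_concat3, if_neg hB]
          simp
        · rw [if_neg hF, if_neg hF]
          have h2 : a :: x :: y :: z :: (m ++ [d, e, f]) = (a :: x :: y :: z :: m) ++ [d, e, f] := by simp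
          rw [h2, stepA_concat3, if_neg hB]
          simp

theorem stepB_rev (rev : List String) (c : String) :
    (stepB rev c).reverse = gstep c rev.reverse := by
  have hsl : PySem.List.slice rev (some (-3)) none = rev.drop (rev.length - 3) :=
    PySem.List.slice_from_neg_ofNat rev 3 (by norm_num)
  have hsl2 : PySem.List.slice rev none (some (-3)) = rev.take (rev.length - 3) :=
    PySem.List.slice_to_neg_ofNat rev 3 (by norm_num)
  have hcond : (rev.drop (rev.length - 3) = ["P", "A", "P"]) ↔
      (rev.reverse.take 3 = ["P", "A", "P"]) := by
    rw [List.take_reverse]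
    constructor
    · intro h; rw [h]; rfl
    · intro h
      have h2 := congrArg List.reverse h
      simpa using h2
  simp only [stepB, gstep, hsl, hsl2]
  by_cases hc : c = "P" ∧ rev.drop (rev.length - 3) = ["P", "A", "P"]
  · have hlen : 3 ≤ rev.length := by
      have h3 := hc.2
      apply_fun List.length at h3
      simp at h3
      omega
    rw [if_pos hc, if_pos ⟨hc.1, hcond.mp hc.2⟩]
    rw [List.reverse_append]
    have h4 : (rev.take (rev.length - 3)).reverse = rev.reverse.drop 3 := by
      rw [List.reverse_take]
      congr 1
      omega
    rw [h4]
    rfl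
  · have hc2 : ¬(c = "P" ∧ rev.reverse.take 3 = ["P", "A", "P"]) := by
      intro ⟨h1, h2⟩; exact hc ⟨h1, hcond.mpr h2⟩
    rw [if_neg hc, if_neg hc2]
    simp

theorem foldB_rev (s : List String) :
    (s.reverse.foldl stepB []).reverse = s.foldr gstep [] := by
  rw [List.foldl_reverse]
  induction s with
  | nil => rfl
  | cons a s ih =>
    simp only [List.foldr_cons]
    rw [stepB_rev, ih]

theorem key (s : List String) (c : String) :
    (s ++ [c]).foldr gstep [] = stepA (s.foldr gstep []) c := by
  induction s with
  | nil =>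
    simp [gstep, stepA_short]
  | cons a s ih =>
    simp only [List.cons_append, List.foldr_cons]
    rw [ih, commute]

theorem foldA_eq (s : List String) :
    s.foldl stepA [] = s.foldr gstep [] := by
  induction s using List.reverseRecOn with
  | nil => rfl
  | append_singleton s c ih =>
    rw [List.foldl_concat, ih, key]

-- ===== VERDICT (by name: the statement is the Claim_ definition above) =====
theorem solution_spec : Claim_equal_solution := by
  intro s _
  unfold Spec_solution solution solution_alt
  simp only [foldB_rev, foldA_eq]
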